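-- pv_equiv track=rewrite | github.com/freddy0218/2025_windstorm_CI | util/ml/preproc.py | get_num_unique_var
-- ===== SOURCE A (Python) =====
-- def get_num_unique_var(filted_feature):
--     TEST = [filted_feature[:i+1] for i in range(len(filted_feature))]
--     storename_exp = []
--     for obj in TEST:
--         storename = []
--         for i in range(len(obj)):
--             storename.append(obj[i][0])
--         storename_exp.append(storename)
--     return [len(list(set(obj))) for obj in storename_exp]
-- ===== SOURCE B (Python) =====
-- def get_num_unique_var(filted_feature):
--     # First-occurrence table + prefix sum of a 0/1 delta list.
--     first = {}
--     for idx, elem in enumerate(filted_feature):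
--         k = elem[0]
--         if k not in first:
--             first[k] = idx
--     delta = [0] * len(filted_feature)
--     for f in first.values():
--         delta[f] = 1
--     out = []
--     total = 0
--     for d in delta:
--         total += d
--         out.append(total)
--     return out
-- ===== Notes on version B (the rewrite author's own statement) =====
-- stated objective: faster
-- what changed: Replaces building every prefix list and a set per prefix with one pass recording each key's first-occurrence index, a 0/1 delta list, and a running prefix sum.
import Mathlib
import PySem

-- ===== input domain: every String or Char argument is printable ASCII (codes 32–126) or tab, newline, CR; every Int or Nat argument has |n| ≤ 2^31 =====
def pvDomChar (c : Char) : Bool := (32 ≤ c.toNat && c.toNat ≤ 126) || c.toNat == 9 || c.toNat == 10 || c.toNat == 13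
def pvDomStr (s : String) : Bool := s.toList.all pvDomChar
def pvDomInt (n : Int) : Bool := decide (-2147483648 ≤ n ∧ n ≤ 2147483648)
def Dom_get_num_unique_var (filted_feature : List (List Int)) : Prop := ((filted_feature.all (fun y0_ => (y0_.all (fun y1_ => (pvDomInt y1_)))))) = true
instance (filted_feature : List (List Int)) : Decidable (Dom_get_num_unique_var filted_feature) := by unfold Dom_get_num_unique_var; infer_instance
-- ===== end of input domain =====

-- B replaces A's quadratic prefix-copy-and-set pass with a first-occurrence index table,
-- a 0/1 delta list and one running prefix sum (a different, linear decomposition).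

-- ===== PORT A =====
def get_num_unique_var (filted_feature : List (List Int)) : List Int :=
  -- TEST = [filted_feature[:i+1] for i in range(len(filted_feature))]
  let TEST := (PySem.List.pyRange 0 (filted_feature.length : Int) 1).map
      (fun i => PySem.List.slice filted_feature none (some (i + 1)))
  -- for obj in TEST: storename = []; for i in range(len(obj)): storename.append(obj[i][0])
  let storename_exp := TEST.map (fun obj =>
    (PySem.List.pyRange 0 (obj.length : Int) 1).foldl
      (fun storename i =>
        storename ++ [PySem.List.pyGetD (PySem.List.pyGetD obj i []) 0 0]) [])
  -- [len(list(set(obj))) for obj in storename_exp]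
  storename_exp.map (fun obj => ((PySem.Set.ofList obj).length : Int))

-- ===== PORT B =====
def get_num_unique_var_alt (filted_feature : List (List Int)) : List Int :=
  -- first = {}; for idx, elem in enumerate(filted_feature): k = elem[0]; if k not in first: first[k] = idx
  let first : PySem.Dict Int Int :=
    (PySem.List.enumerate filted_feature 0).foldl
      (fun d p =>
        let k := PySem.List.pyGetD p.2 0 0
        if d.contains k then d else d.insert k p.1) PySem.Dict.empty
  -- delta = [0] * len(filted_feature); for f in first.values(): delta[f] = 1
  let delta : List Int :=
    first.values.foldl (fun dl f => PySem.List.pySetD dl f 1)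
      (List.replicate filted_feature.length 0)
  -- out = []; total = 0; for d in delta: total += d; out.append(total)
  (delta.foldl (fun acc d => (acc.1 ++ [acc.2 + d], acc.2 + d)) (([] : List Int), (0 : Int))).1

-- ===== PRECONDITION & SPEC =====
-- Pre_ excludes inputs containing an empty inner list: there Python A raises IndexError on elem[0].
def Pre_get_num_unique_var (filted_feature : List (List Int)) : Prop :=
  ∀ e ∈ filted_feature, e ≠ []
instance (filted_feature : List (List Int)) : Decidable (Pre_get_num_unique_var filted_feature) := by
  unfold Pre_get_num_unique_var; infer_instance
def pvWitness_get_num_unique_var : List (List Int) := [[3, 1], [2], [3, 5], [4], [2]]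
def Spec_get_num_unique_var (filted_feature : List (List Int)) (out : List Int) : Prop := out = get_num_unique_var_alt filted_feature
instance (filted_feature : List (List Int)) (out : List Int) : Decidable (Spec_get_num_unique_var filted_feature out) := by unfold Spec_get_num_unique_var; infer_instance

-- ===== CLAIM (what is proved, stated in full; the proofs are below) =====
def Claim_equal_get_num_unique_var : Prop := ∀ (filted_feature : List (List Int)), Dom_get_num_unique_var filted_feature → Pre_get_num_unique_var filted_feature → Spec_get_num_unique_var filted_feature (get_num_unique_var filted_feature)

-- ===== LEMMAS AND PROOFS =====

-- key of a row, as both ports compute it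
def pvKey (e : List Int) : Int := PySem.List.pyGetD e 0 0

-- prefix-sum list: ps t [d1,d2,...] = [t+d1, t+d1+d2, ...]
def pvPs (t : Int) : List Int → List Int
  | [] => []
  | d :: ds => (t + d) :: pvPs (t + d) ds

-- indicator list of first occurrences of keys, seen-set accumulator
def pvInd (pre : PySem.Set Int) : List Int → List Int
  | [] => []
  | k :: ks => (if k ∈ pre then (0 : Int) else 1) :: pvInd (PySem.Set.add pre k) ks

theorem pvInd_length (pre : PySem.Set Int) (ks : List Int) : (pvInd pre ks).length = ks.length := by
  induction ks generalizing pre with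
  | nil => rfl
  | cons k ks ih => simp [pvInd, ih]

theorem pvSet_ofList_append (xs : List Int) (x : Int) :
    PySem.Set.ofList (xs ++ [x]) = PySem.Set.add (PySem.Set.ofList xs) x := by
  simp [PySem.Set.ofList_eq_foldl]

theorem pvSet_len_add (s : PySem.Set Int) (x : Int) :
    (((PySem.Set.add s x).length : Int)) = (s.length : Int) + (if x ∈ s then 0 else 1) := by
  by_cases h : x ∈ s <;> simp [PySem.Set.add, h]

-- master lemma: prefix sums of the indicator list are the prefix distinct counts
theorem pvMaster (ks pre : List Int) :
    pvPs ((PySem.Set.ofList pre).length : Int) (pvInd (PySem.Set.ofList pre) ks) =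
      (List.range ks.length).map
        (fun i => ((PySem.Set.ofList (pre ++ ks.take (i + 1))).length : Int)) := by
  induction ks generalizing pre with
  | nil => simp [pvInd, pvPs]
  | cons k ks ih =>
      have hlen : ((PySem.Set.ofList (pre ++ [k])).length : Int)
          = ((PySem.Set.ofList pre).length : Int) + (if k ∈ PySem.Set.ofList pre then 0 else 1) := by
        rw [pvSet_ofList_append, pvSet_len_add]
      have hih := ih (pre ++ [k])
      simp only [pvInd, pvPs, List.length_cons, List.range_succ_eq_map, List.map_cons, List.map_map,
        List.cons.injEq]
      constructor
      · rw [← hlen]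
        simp
      · rw [← hlen, ← pvSet_ofList_append, hih]
        apply List.map_congr_left
        intro i _
        simp [List.append_assoc]

theorem pvA_ref (ff : List (List Int)) :
    get_num_unique_var ff =
      (List.range ff.length).map
        (fun i => ((PySem.Set.ofList ((ff.map pvKey).take (i + 1))).length : Int)) := by
  unfold get_num_unique_var
  rw [PySem.List.pyRange_zero_natCast, List.map_map, List.map_map, List.map_map]
  apply List.map_congr_left
  intro i _
  have h1 : ((i : Int) + 1) = ((i + 1 : Nat) : Int) := by push_cast; ring
  simp only [Function.comp, h1, PySem.List.slice_to_natCast]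
  have h2 : (List.foldl
      (fun storename j => storename ++ [PySem.List.pyGetD (PySem.List.pyGetD (List.take (i+1) ff) j []) 0 0])
      [] (PySem.List.pyRange 0 ((List.take (i+1) ff).length : Int) 1))
      = (List.take (i+1) ff).map pvKey := by
    have h3 := PySem.List.foldl_pyRange_zero_pyGetD (List.take (i+1) ff) ([] : List Int)
      (fun (acc : List Int) (x : List Int) => acc ++ [pvKey x]) []
    simp only [PySem.List.len_eq, pvKey] at h3
    refine h3.trans ?_
    rw [PySem.List.foldl_append_singleton_eq_map, List.nil_append]
    rfl
  rw [h2, List.map_take]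

-- ---- B side ----

theorem pvIdxOf_lt_of_mem_take (ks : List Int) (k : Int) (j : Nat) (hmem : k ∈ ks.take j) :
    ks.idxOf k < j := by
  have h1 : ks.idxOf k = (ks.take j).idxOf k := by
    conv_lhs => rw [← List.take_append_drop j ks]
    rw [List.idxOf_append, if_pos hmem]
  have h2 : (ks.take j).idxOf k < (ks.take j).length := List.idxOf_lt_length_iff.2 hmem
  have h3 : (ks.take j).length ≤ j := by simp [List.length_take]
  omega

-- the dict of first occurrences built by B's first loop
theorem pvFirst_items (ff : List (List Int)) :
    ((PySem.List.enumerate ff 0).foldl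
      (fun d p =>
        let k := PySem.List.pyGetD p.2 0 0
        if d.contains k then d else d.insert k p.1) PySem.Dict.empty).items
    = (PySem.List.dedup (ff.map pvKey)).map
        (fun k => (k, ((ff.map pvKey).idxOf k : Int))) := by
  induction ff using List.reverseRecOn with
  | nil => simp [PySem.List.enumerate, PySem.List.dedup, PySem.Set.ofList, PySem.Dict.empty]
  | append_singleton xs x ih =>
      rw [PySem.List.enumerate_append]
      simp only [List.foldl_append, PySem.List.enumerate, List.foldl_cons, List.foldl_nil]
      set d := ((PySem.List.enumerate xs 0).foldl
        (fun d p =>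
          let k := PySem.List.pyGetD p.2 0 0
          if d.contains k then d else d.insert k p.1) PySem.Dict.empty) with hd
      set ks := xs.map pvKey with hks
      have hkeys : d.keys = PySem.List.dedup ks := by
        simp [PySem.Dict.keys, ih, List.map_map, Function.comp_def]
      have hcont : d.contains (PySem.List.pyGetD x 0 0) = decide (pvKey x ∈ ks) := by
        rw [PySem.Dict.contains_eq_decide_mem_keys, hkeys]
        simp [PySem.List.dedup_eq_ofList, PySem.Set.mem_ofList, pvKey]
      have hmapapp : (xs ++ [x]).map pvKey = ks ++ [pvKey x] := by simp [hks]
      by_cases hk : pvKey x ∈ ks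
      · simp only [hcont, hk, decide_true, if_true, ih, hmapapp]
        have hded : PySem.List.dedup (ks ++ [pvKey x]) = PySem.List.dedup ks := by
          simp [PySem.List.dedup_eq_ofList, pvSet_ofList_append, PySem.Set.add, hk]
        rw [hded]
        apply List.map_congr_left
        intro a ha
        have ha' : a ∈ ks := by
          rw [PySem.List.dedup_eq_ofList] at ha
          exact (PySem.Set.mem_ofList ks a).1 ha
        rw [List.idxOf_append, if_pos ha']
      · simp only [hcont, hk, decide_false, Bool.false_eq_true, if_false]
        rw [PySem.Dict.items_insert_of_not_contains _ _ (by rw [hcont]; simp [hk]), ih, hmapapp]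
        have hded : PySem.List.dedup (ks ++ [pvKey x]) = PySem.List.dedup ks ++ [pvKey x] := by
          simp [PySem.List.dedup_eq_ofList, pvSet_ofList_append, PySem.Set.add,
            PySem.Set.contains, hk]
        rw [hded, List.map_append]
        congr 1
        · apply List.map_congr_left
          intro a ha
          have ha' : a ∈ ks := by
            rw [PySem.List.dedup_eq_ofList] at ha
            exact (PySem.Set.mem_ofList ks a).1 ha
          rw [List.idxOf_append, if_pos ha']
        · have hidx : (ks ++ [pvKey x]).idxOf (pvKey x) = ks.length := by
            rw [List.idxOf_append, if_neg hk]
            simp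
          simpa [pvKey, hks] using hidx.symm

theorem pvSetFold_length (vs : List Int) (dl0 : List Int) :
    (vs.foldl (fun dl f => PySem.List.pySetD dl f 1) dl0).length = dl0.length := by
  induction vs generalizing dl0 with
  | nil => rfl
  | cons v vs ih => simp [ih, PySem.List.length_pySetD]

theorem pvSetFold_getElem? (vs : List Int) (h0 : ∀ v ∈ vs, 0 ≤ v) (dl0 : List Int)
    (j : Nat) (hj : j < dl0.length) :
    (vs.foldl (fun dl f => PySem.List.pySetD dl f 1) dl0)[j]?
      = some (if (j : Int) ∈ vs then 1 else dl0[j]) := by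
  induction vs generalizing dl0 with
  | nil => simp [List.getElem?_eq_getElem hj]
  | cons v vs ih =>
      have hv : 0 ≤ v := h0 v (by simp)
      have hlen : (PySem.List.pySetD dl0 v 1).length = dl0.length := by
        simp [PySem.List.length_pySetD]
      rw [List.foldl_cons, ih (fun w hw => h0 w (by simp [hw])) _ (by omega)]
      by_cases hmem : (j : Int) ∈ vs
      · simp [hmem]
      · simp only [hmem, if_false, List.mem_cons, or_false]
        congr 1
        simp only [PySem.List.pySetD_of_nonneg _ _ hv, List.getElem_set]
        by_cases hvj : (j : Int) = v
        · have hv2 : v.toNat = j := by omega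
          simp [hv2, hvj]
        · have hv2 : v.toNat ≠ j := by omega
          simp [hv2, hvj]

theorem pvInd_getElem (pre : PySem.Set Int) (ks : List Int) (j : Nat) (hj : j < ks.length) :
    (pvInd pre ks)[j]'(by rw [pvInd_length]; exact hj)
      = if ks[j] ∈ pre ∨ ks[j] ∈ ks.take j then 0 else 1 := by
  induction ks generalizing pre j with
  | nil => simp at hj
  | cons k ks ih =>
      cases j with
      | zero => simp [pvInd]
      | succ j =>
          have hj' : j < ks.length := by simpa using hj
          simp only [pvInd, List.getElem_cons_succ, ih _ j hj', List.take_succ_cons,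
            List.mem_cons, PySem.Set.mem_add]
          by_cases h1 : ks[j] ∈ pre <;> by_cases h2 : ks[j] = k <;> by_cases h3 : ks[j] ∈ ks.take j <;>
            simp [h1, h2, h3]

theorem pvMemValues (ks : List Int) (j : Nat) (hj : j < ks.length) :
    ((j : Int) ∈ (PySem.List.dedup ks).map (fun k => ((ks.idxOf k : Nat) : Int)))
      ↔ ks[j] ∉ ks.take j := by
  constructor
  · intro hmem
    obtain ⟨k, hk, heq⟩ := List.mem_map.1 hmem
    have hk' : k ∈ ks := by
      rw [PySem.List.dedup_eq_ofList] at hk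
      exact (PySem.Set.mem_ofList ks k).1 hk
    have hidx : ks.idxOf k = j := by omega
    have hget : ks[j] = k := by
      simpa [hidx] using List.getElem_idxOf (by omega : List.idxOf k ks < ks.length)
    intro habs
    have := pvIdxOf_lt_of_mem_take ks ks[j] j habs
    rw [hget, hidx] at this
    omega
  · intro hnot
    refine List.mem_map.2 ⟨ks[j], ?_, ?_⟩
    · rw [PySem.List.dedup_eq_ofList]
      exact (PySem.Set.mem_ofList ks ks[j]).2 (List.getElem_mem hj)
    · have hidx : List.idxOf ks[j] ks = j := by
        obtain ⟨a, ha⟩ : ∃ a, ks[j] = a := ⟨ks[j], rfl⟩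
        have hsplit : ks = ks.take j ++ a :: ks.drop (j+1) := by
          rw [← ha, ← List.drop_eq_getElem_cons hj, List.take_append_drop]
        rw [ha] at hnot ⊢
        conv_lhs => rw [hsplit]
        rw [List.idxOf_append, if_neg hnot, List.idxOf_cons]
        simp [List.length_take]
        omega
      rw [hidx]

theorem pvFoldOut (ds : List Int) (out : List Int) (t : Int) :
    (ds.foldl (fun acc d => (acc.1 ++ [acc.2 + d], acc.2 + d)) (out, t)).1 = out ++ pvPs t ds := by
  induction ds generalizing out t with
  | nil => simp [pvPs]
  | cons d ds ih => simp [pvPs, ih]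

theorem pvB_ref (ff : List (List Int)) :
    get_num_unique_var_alt ff =
      (List.range ff.length).map
        (fun i => ((PySem.Set.ofList ((ff.map pvKey).take (i + 1))).length : Int)) := by
  simp only [get_num_unique_var_alt]
  set ks := ff.map pvKey with hks
  have hvals : ((PySem.List.enumerate ff 0).foldl
      (fun d p =>
        let k := PySem.List.pyGetD p.2 0 0
        if d.contains k then d else d.insert k p.1) PySem.Dict.empty).values
      = (PySem.List.dedup ks).map (fun k => ((ks.idxOf k : Nat) : Int)) := by
    simp [PySem.Dict.values, pvFirst_items, List.map_map, Function.comp_def, ← hks]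
  rw [hvals]
  have hn : ks.length = ff.length := by simp [hks]
  have hdelta : ((PySem.List.dedup ks).map (fun k => ((ks.idxOf k : Nat) : Int))).foldl
      (fun dl f => PySem.List.pySetD dl f 1) (List.replicate ff.length 0)
      = pvInd (PySem.Set.ofList []) ks := by
    apply List.ext_getElem?
    intro j
    by_cases hjn : j < ks.length
    · rw [pvSetFold_getElem? _ (by intro v hv; obtain ⟨k, _, hkeq⟩ := List.mem_map.1 hv; omega)
            _ j (by simp; omega),
          List.getElem?_eq_getElem (by rw [pvInd_length]; exact hjn),
          pvInd_getElem _ _ j hjn]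
      congr 1
      rw [List.getElem_replicate]
      have hmv := pvMemValues ks j hjn
      by_cases h : ks[j] ∈ ks.take j
      · have hno : ¬ ((j : Int) ∈ (PySem.List.dedup ks).map (fun k => ((ks.idxOf k : Nat) : Int))) :=
          fun hm => (hmv.1 hm) h
        rw [if_neg hno, if_pos (Or.inr h)]
      · have hyes := hmv.2 h
        rw [if_pos hyes, if_neg (by rintro (hx | hx)
                                    · simp [PySem.Set.ofList] at hx
                                    · exact h hx)]
    · rw [List.getElem?_eq_none, List.getElem?_eq_none]
      · rw [pvInd_length]; omega
      · rw [pvSetFold_length, List.length_replicate]; omega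
  rw [hdelta, pvFoldOut]
  have h0 : ((PySem.Set.ofList ([] : List Int)).length : Int) = 0 := by simp [PySem.Set.ofList]
  rw [List.nil_append, ← h0, pvMaster]
  simp [hn]

-- ===== VERDICT (by name: the statement is the Claim_ definition above) =====
theorem get_num_unique_var_spec : Claim_equal_get_num_unique_var := by
  intro ff _ _
  unfold Spec_get_num_unique_var
  rw [pvA_ref, pvB_ref]
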